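-- pv_equiv track=rewrite | github.com/abishek-as/NeetCode-ALL | Array & Hashing/findHighLowFreqElement.py | getFrequencies
-- ===== SOURCE A (Python) =====
-- from typing import List
--
-- def getFrequencies(nums: List[int]) -> List[int]:
--     hashMap = {}
--     for i in range(len(nums)):
--         hashMap[nums[i]] = 1 + hashMap.get(nums[i], 0)
--
--     max_value = max(hashMap.values())
--     min_value = min(hashMap.values())
--     max_freq = [key for key, value in hashMap.items() if value == max_value]
--     min_freq = [key for key, value in hashMap.items() if value == min_value]
--     max_freq_element = min(max_freq)
--     min_freq_element = min(min_freq)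
--     return max_freq_element, min_freq_element
-- ===== SOURCE B (Python) =====
-- def getFrequencies(nums):
--     hashMap = {}
--     for x in nums:
--         hashMap[x] = hashMap.get(x, 0) + 1
--
--     (best_max_key, best_max_val), *rest = hashMap.items()
--     best_min_key, best_min_val = best_max_key, best_max_val
--     for k, v in rest:
--         if v > best_max_val or (v == best_max_val and k < best_max_key):
--             best_max_key, best_max_val = k, v
--         if v < best_min_val or (v == best_min_val and k < best_min_key):
--             best_min_key, best_min_val = k, v
--     return best_max_key, best_min_key
-- ===== Notes on version B (the rewrite author's own statement) =====
-- stated objective: simpler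
-- what changed: A's five passes after counting (max over values, min over values, two filtering comprehensions, two min() calls) are replaced by a single pass over the dict items that keeps running (max-frequency, smallest-key) and (min-frequency, smallest-key) pairs.
import Mathlib
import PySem

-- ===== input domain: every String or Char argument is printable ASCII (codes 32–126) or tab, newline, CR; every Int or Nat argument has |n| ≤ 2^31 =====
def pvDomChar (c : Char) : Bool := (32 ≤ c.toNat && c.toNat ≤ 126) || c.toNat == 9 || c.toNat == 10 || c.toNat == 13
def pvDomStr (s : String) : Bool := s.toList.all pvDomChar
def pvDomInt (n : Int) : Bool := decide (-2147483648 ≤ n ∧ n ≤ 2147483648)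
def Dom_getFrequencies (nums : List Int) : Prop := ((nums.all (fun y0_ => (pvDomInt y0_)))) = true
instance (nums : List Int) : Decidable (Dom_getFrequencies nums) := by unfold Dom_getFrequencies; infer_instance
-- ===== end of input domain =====

-- B replaces A's max/min over the values plus two filtering comprehensions plus two
-- min() calls by one pass over the dict items keeping running extrema; same return value.

-- ===== PORT A =====
def getFrequencies (nums : List Int) : Int × Int :=
  let hashMap := (PySem.List.pyRange 0 (PySem.List.len nums)).foldl
    (fun d i => d.insert (PySem.List.pyGetD nums i 0)
      (1 + d.getD (PySem.List.pyGetD nums i 0) 0)) (PySem.Dict.empty : PySem.Dict Int Int)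
  match PySem.List.max? hashMap.values (fun v => v),
        PySem.List.min? hashMap.values (fun v => v) with
  | some maxValue, some minValue =>
    let maxFreq := (hashMap.items.filter (fun p => p.2 == maxValue)).map (fun p => p.1)
    let minFreq := (hashMap.items.filter (fun p => p.2 == minValue)).map (fun p => p.1)
    match PySem.List.min? maxFreq (fun k => k), PySem.List.min? minFreq (fun k => k) with
    | some a, some b => (a, b)
    | _, _ => (0, 0)          -- unreachable: maxFreq/minFreq are nonempty when the dict is
  | _, _ => (0, 0)            -- Python raises ValueError here (empty nums); excluded by Pre_

-- ===== PORT B =====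
-- running (key, frequency) pair for the max side: replace on strictly larger
-- frequency, or on equal frequency and strictly smaller key
def pvStepMax (s q : Int × Int) : Int × Int :=
  if s.2 < q.2 ∨ (q.2 = s.2 ∧ q.1 < s.1) then q else s
-- running (key, frequency) pair for the min side
def pvStepMin (s q : Int × Int) : Int × Int :=
  if q.2 < s.2 ∨ (q.2 = s.2 ∧ q.1 < s.1) then q else s

def getFrequencies_alt (nums : List Int) : Int × Int :=
  let hashMap := nums.foldl (fun d x => d.insert x (d.getD x 0 + 1))
    (PySem.Dict.empty : PySem.Dict Int Int)
  match hashMap.items with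
  | [] => (0, 0)              -- Python raises ValueError here (empty nums); excluded by Pre_
  | p0 :: rest =>
    let r := rest.foldl (fun s q => (pvStepMax s.1 q, pvStepMin s.2 q)) (p0, p0)
    (r.1.1, r.2.1)

-- ===== PRECONDITION & SPEC =====
-- Pre_ excludes only the empty list, on which A raises ValueError (max() of an empty sequence).
def Pre_getFrequencies (nums : List Int) : Prop := nums ≠ []
instance (nums : List Int) : Decidable (Pre_getFrequencies nums) := by
  unfold Pre_getFrequencies; infer_instance
def pvWitness_getFrequencies : List Int := [1, 2, 2]

def Spec_getFrequencies (nums : List Int) (out : Int × Int) : Prop := out = getFrequencies_alt nums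
instance (nums : List Int) (out : Int × Int) : Decidable (Spec_getFrequencies nums out) := by
  unfold Spec_getFrequencies; infer_instance

-- ===== CLAIM (what is proved, stated in full; the proofs are below) =====
def Claim_equal_getFrequencies : Prop := ∀ (nums : List Int), Dom_getFrequencies nums → Pre_getFrequencies nums → Spec_getFrequencies nums (getFrequencies nums)

-- ===== LEMMAS AND PROOFS =====

-- the two counting loops build the same dict (index loop over range = element loop)
lemma pv_dict_eq (nums : List Int) :
    (PySem.List.pyRange 0 (PySem.List.len nums)).foldl
      (fun d i => d.insert (PySem.List.pyGetD nums i 0)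
        (1 + d.getD (PySem.List.pyGetD nums i 0) 0)) (PySem.Dict.empty : PySem.Dict Int Int)
    = nums.foldl (fun d x => d.insert x (d.getD x 0 + 1)) (PySem.Dict.empty : PySem.Dict Int Int) := by
  have h := List.foldl_map (f := fun i => PySem.List.pyGetD nums i 0)
    (g := fun (d : PySem.Dict Int Int) x => d.insert x (1 + d.getD x 0))
    (l := PySem.List.pyRange 0 (PySem.List.len nums)) (init := PySem.Dict.empty)
  rw [PySem.List.map_pyGetD_pyRange_zero] at h
  have h2 : (fun (d : PySem.Dict Int Int) x => d.insert x (1 + d.getD x 0))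
       = (fun (d : PySem.Dict Int Int) x => d.insert x (d.getD x 0 + 1)) := by
    funext d x; rw [Int.add_comm]
  rw [h2] at h
  exact h.symm

-- characterization of the max-side running fold: the result is one of the visited
-- pairs, its frequency is maximal, and its key is minimal among pairs of that frequency
lemma pv_bestMax_props (P : List (Int × Int)) : ∀ s : Int × Int,
    P.foldl pvStepMax s ∈ s :: P ∧
    ∀ p ∈ s :: P, p.2 ≤ (P.foldl pvStepMax s).2 ∧
      (p.2 = (P.foldl pvStepMax s).2 → (P.foldl pvStepMax s).1 ≤ p.1) := by
  induction P with
  | nil => intro s; simp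
  | cons q P ih =>
    intro s
    have hstep : pvStepMax s q = s ∨ pvStepMax s q = q := by
      unfold pvStepMax; split_ifs <;> simp
    have hdom : (s.2 ≤ (pvStepMax s q).2 ∧ (s.2 = (pvStepMax s q).2 → (pvStepMax s q).1 ≤ s.1)) ∧
                (q.2 ≤ (pvStepMax s q).2 ∧ (q.2 = (pvStepMax s q).2 → (pvStepMax s q).1 ≤ q.1)) := by
      unfold pvStepMax; split_ifs with h <;> constructor <;> constructor <;> omega
    obtain ⟨ihmem, ihdom⟩ := ih (pvStepMax s q)
    have hfold : (q :: P).foldl pvStepMax s = P.foldl pvStepMax (pvStepMax s q) := rfl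
    rw [hfold]
    constructor
    · rcases List.mem_cons.mp ihmem with h | h
      · rw [h]; rcases hstep with h' | h' <;> simp [h']
      · simp [h]
    · intro p hp
      have h1 := (ihdom (pvStepMax s q) (List.mem_cons_self)).1
      have h2 := (ihdom (pvStepMax s q) (List.mem_cons_self)).2
      rcases List.mem_cons.mp hp with h | h
      · subst h; exact ⟨by omega, by omega⟩
      rcases List.mem_cons.mp h with h | h
      · subst h; exact ⟨by omega, by omega⟩
      · exact ihdom p (List.mem_cons_of_mem _ h)

-- characterization of the min-side running fold
lemma pv_bestMin_props (P : List (Int × Int)) : ∀ s : Int × Int,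
    P.foldl pvStepMin s ∈ s :: P ∧
    ∀ p ∈ s :: P, (P.foldl pvStepMin s).2 ≤ p.2 ∧
      (p.2 = (P.foldl pvStepMin s).2 → (P.foldl pvStepMin s).1 ≤ p.1) := by
  induction P with
  | nil => intro s; simp
  | cons q P ih =>
    intro s
    have hstep : pvStepMin s q = s ∨ pvStepMin s q = q := by
      unfold pvStepMin; split_ifs <;> simp
    have hdom : ((pvStepMin s q).2 ≤ s.2 ∧ (s.2 = (pvStepMin s q).2 → (pvStepMin s q).1 ≤ s.1)) ∧
                ((pvStepMin s q).2 ≤ q.2 ∧ (q.2 = (pvStepMin s q).2 → (pvStepMin s q).1 ≤ q.1)) := by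
      unfold pvStepMin; split_ifs with h <;> constructor <;> constructor <;> omega
    obtain ⟨ihmem, ihdom⟩ := ih (pvStepMin s q)
    have hfold : (q :: P).foldl pvStepMin s = P.foldl pvStepMin (pvStepMin s q) := rfl
    rw [hfold]
    constructor
    · rcases List.mem_cons.mp ihmem with h | h
      · rw [h]; rcases hstep with h' | h' <;> simp [h']
      · simp [h]
    · intro p hp
      have h1 := (ihdom (pvStepMin s q) (List.mem_cons_self)).1
      have h2 := (ihdom (pvStepMin s q) (List.mem_cons_self)).2
      rcases List.mem_cons.mp hp with h | h
      · subst h; exact ⟨by omega, by omega⟩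
      rcases List.mem_cons.mp h with h | h
      · subst h; exact ⟨by omega, by omega⟩
      · exact ihdom p (List.mem_cons_of_mem _ h)

-- ===== VERDICT (by name: the statement is the Claim_ definition above) =====
theorem getFrequencies_spec : Claim_equal_getFrequencies := by
  unfold Claim_equal_getFrequencies
  intro nums _ hpre
  unfold Pre_getFrequencies at hpre
  simp only [Spec_getFrequencies, getFrequencies, getFrequencies_alt]
  rw [pv_dict_eq, PySem.Dict.foldl_insert_getD_add_one_eq_counter]
  have hne : (PySem.Dict.counter nums).items ≠ [] := by
    rw [PySem.Dict.items_counter]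
    obtain ⟨y, ys, rfl⟩ := List.exists_cons_of_ne_nil hpre
    intro h
    rw [List.map_eq_nil_iff] at h
    have hy : y ∈ PySem.Set.ofList (y :: ys) :=
      (PySem.Set.mem_ofList _ _).mpr (List.mem_cons_self)
    rw [h] at hy
    exact (List.not_mem_nil) hy
  obtain ⟨p0, rest, heq⟩ := List.exists_cons_of_ne_nil hne
  have hv : (PySem.Dict.counter nums).values = p0.2 :: rest.map Prod.snd := by
    simp only [PySem.Dict.values, heq, List.map_cons]
  rw [heq]
  dsimp only
  rw [PySem.List.foldl_prod_mk]
  obtain ⟨hmaxmem, hmaxdom⟩ := pv_bestMax_props rest p0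
  obtain ⟨hminmem, hmindom⟩ := pv_bestMin_props rest p0
  set rmax := rest.foldl pvStepMax p0 with hrmax
  set rmin := rest.foldl pvStepMin p0 with hrmin
  cases hM : PySem.List.max? (PySem.Dict.counter nums).values (fun v => v) with
  | none =>
    rw [PySem.List.max?_eq_none_iff, hv] at hM
    exact absurd hM (List.cons_ne_nil _ _)
  | some M =>
  cases hm : PySem.List.min? (PySem.Dict.counter nums).values (fun v => v) with
  | none =>
    rw [PySem.List.min?_eq_none_iff, hv] at hm
    exact absurd hm (List.cons_ne_nil _ _)
  | some m =>
  have hrmaxv : rmax.2 ∈ (PySem.Dict.counter nums).values := by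
    rw [hv]
    rcases List.mem_cons.mp hmaxmem with h | h
    · rw [h]; exact List.mem_cons_self
    · exact List.mem_cons_of_mem _ (List.mem_map_of_mem h)
  have hMrmax : M = rmax.2 := by
    have h1 : rmax.2 ≤ M := PySem.List.max?_isMax hM rmax.2 hrmaxv
    have hMmem := PySem.List.max?_mem hM
    rw [hv] at hMmem
    have h2 : M ≤ rmax.2 := by
      rcases List.mem_cons.mp hMmem with h | h
      · rw [h]; exact (hmaxdom p0 List.mem_cons_self).1
      · obtain ⟨p, hp, hpv⟩ := List.mem_map.mp h
        rw [← hpv]; exact (hmaxdom p (List.mem_cons_of_mem _ hp)).1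
    omega
  have hrminv : rmin.2 ∈ (PySem.Dict.counter nums).values := by
    rw [hv]
    rcases List.mem_cons.mp hminmem with h | h
    · rw [h]; exact List.mem_cons_self
    · exact List.mem_cons_of_mem _ (List.mem_map_of_mem h)
  have hmrmin : m = rmin.2 := by
    have h1 : m ≤ rmin.2 := PySem.List.min?_isMin hm rmin.2 hrminv
    have hmmem := PySem.List.min?_mem hm
    rw [hv] at hmmem
    have h2 : rmin.2 ≤ m := by
      rcases List.mem_cons.mp hmmem with h | h
      · rw [h]; exact (hmindom p0 List.mem_cons_self).1
      · obtain ⟨p, hp, hpv⟩ := List.mem_map.mp h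
        rw [← hpv]; exact (hmindom p (List.mem_cons_of_mem _ hp)).1
    omega
  have hmaxmem' : rmax.1 ∈ (((p0 :: rest).filter (fun p => p.2 == M)).map (fun p => p.1)) := by
    refine List.mem_map.mpr ⟨rmax, List.mem_filter.mpr ⟨hmaxmem, ?_⟩, rfl⟩
    simp [hMrmax]
  have hminmem' : rmin.1 ∈ (((p0 :: rest).filter (fun p => p.2 == m)).map (fun p => p.1)) := by
    refine List.mem_map.mpr ⟨rmin, List.mem_filter.mpr ⟨hminmem, ?_⟩, rfl⟩
    simp [hmrmin]
  cases ha : PySem.List.min? (((p0 :: rest).filter (fun p => p.2 == M)).map (fun p => p.1))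
      (fun k => k) with
  | none =>
    rw [PySem.List.min?_eq_none_iff] at ha
    rw [ha] at hmaxmem'
    exact absurd hmaxmem' (List.not_mem_nil)
  | some a =>
  cases hb : PySem.List.min? (((p0 :: rest).filter (fun p => p.2 == m)).map (fun p => p.1))
      (fun k => k) with
  | none =>
    rw [PySem.List.min?_eq_none_iff] at hb
    rw [hb] at hminmem'
    exact absurd hminmem' (List.not_mem_nil)
  | some b =>
  have ha1 : a ≤ rmax.1 := PySem.List.min?_isMin ha rmax.1 hmaxmem'
  have ha2 : rmax.1 ≤ a := by
    obtain ⟨p, hp, hpk⟩ := List.mem_map.mp (PySem.List.min?_mem ha)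
    have hpf := List.mem_filter.mp hp
    have hpM : p.2 = rmax.2 := by
      have h := hpf.2
      simp only [beq_iff_eq] at h
      omega
    rw [← hpk]
    exact (hmaxdom p hpf.1).2 hpM
  have hb1 : b ≤ rmin.1 := PySem.List.min?_isMin hb rmin.1 hminmem'
  have hb2 : rmin.1 ≤ b := by
    obtain ⟨p, hp, hpk⟩ := List.mem_map.mp (PySem.List.min?_mem hb)
    have hpf := List.mem_filter.mp hp
    have hpm : p.2 = rmin.2 := by
      have h := hpf.2
      simp only [beq_iff_eq] at h
      omega
    rw [← hpk]
    exact (hmindom p hpf.1).2 hpm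
  have : a = rmax.1 := by omega
  have : b = rmin.1 := by omega
  simp_all
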